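-- pv_equiv track=rewrite | github.com/GyuCheol/happy_algorithm | 20_08_August/0806_17685_자동완성/Solution_sorting.py | solution
-- ===== SOURCE A (Python) =====
-- def solution(words):
--     count = len(words)
--     if count == 1:
--         return 1
--
--     words = list(sorted(words))
--
--     prv = (count - 1) * [0]
--     nxt = (count - 1) * [0]
--
--     for i in range(len(words) - 1):
--         word1 = words[i]
--         word2 = words[i + 1]
--
--         comp_len = len(startswith_text(word1, word2))
--
--         prv[i] = comp_len
--         if len(word1) != comp_len:
--             prv[i] += 1
--
--         nxt[i] = comp_len
--         if len(word2) != comp_len: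
--             nxt[i] += 1
--
--     return sum([max(a, b) for a, b in zip(prv + [0], [0] + nxt)])
--
-- def startswith_text(word1, word2):
--     min_length = min(len(word1), len(word2))
--     for i in range(min_length):
--         if word1[i] != word2[i]:
--             return word1[:i]
--     return word1[:min_length]
-- ===== SOURCE B (Python) =====
-- def solution(words):
--     # Count, for every non-empty prefix p, how many words start with p (a flat "trie").
--     cnt = {}
--     for w in words:
--         for k in range(1, len(w) + 1):
--             p = w[:k]
--             cnt[p] = cnt.get(p, 0) + 1
--     total = 0
--     for w in words:
--         typed = len(w)
--         for k in range(1, len(w) + 1):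
--             if cnt[w[:k]] == 1:
--                 typed = k
--                 break
--         total += typed
--     return total
-- ===== Notes on version B (the rewrite author's own statement) =====
-- stated objective: alternative
-- what changed: B drops the sort and the neighbour prefix comparison entirely: it builds a flat prefix counter (a dict trie) over all words in one pass and charges each word the number of characters typed until its prefix count drops to 1.
-- intended difference: On the single list [""] A's hardcoded one-word branch returns 1, while B returns 0, the intended keystroke count for typing the empty word. — e.g. on solution([""]): A returns 1, B returns 0
import Mathlib
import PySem

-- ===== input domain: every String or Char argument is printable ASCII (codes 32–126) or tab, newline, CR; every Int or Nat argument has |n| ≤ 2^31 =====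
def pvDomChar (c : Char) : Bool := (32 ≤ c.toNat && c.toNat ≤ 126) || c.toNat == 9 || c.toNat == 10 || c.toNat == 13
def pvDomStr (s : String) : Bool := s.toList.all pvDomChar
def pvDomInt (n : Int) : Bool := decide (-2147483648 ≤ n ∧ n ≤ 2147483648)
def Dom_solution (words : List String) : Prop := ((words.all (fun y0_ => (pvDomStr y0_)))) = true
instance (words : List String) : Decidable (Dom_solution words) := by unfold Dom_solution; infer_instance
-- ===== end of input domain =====

-- B replaces A's sort + neighbour-comparison algorithm by a flat prefix counter ("trie"):
-- count every prefix of every word once, then each word types characters until its prefix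
-- count drops to 1. Return values agree on every input except the single list [""] (see D_).

-- ===== PORT A =====
-- the scan loop of startswith_text: 'for i in range(min_length): if word1[i] != word2[i]: return word1[:i]'
def swGo (w1 w2 : List Char) (ml : Int) : List Int → List Char
  | [] => PySem.List.slice w1 none (some ml)
  | i :: rest =>
    if PySem.List.pyGet? w1 i ≠ PySem.List.pyGet? w2 i then PySem.List.slice w1 none (some i)
    else swGo w1 w2 ml rest

def startswith_text (word1 word2 : String) : String :=
  let min_length := min (PySem.Str.len word1) (PySem.Str.len word2)
  String.ofList (swGo word1.toList word2.toList min_length (PySem.List.pyRange 0 min_length 1))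

-- one iteration of A's main loop (i comes from range(len(words)-1), hence 0 ≤ i and i.toNat is exact)
def aStep (ws : List String) (st : List Int × List Int) (i : Int) : List Int × List Int :=
  let word1 := PySem.List.pyGetD ws i ""
  let word2 := PySem.List.pyGetD ws (i + 1) ""
  let comp_len : Int := PySem.Str.len (startswith_text word1 word2)
  let prv1 := st.1.set i.toNat comp_len
  let prv2 := if PySem.Str.len word1 ≠ comp_len then prv1.set i.toNat (PySem.List.pyGetD prv1 i 0 + 1) else prv1
  let nxt1 := st.2.set i.toNat comp_len
  let nxt2 := if PySem.Str.len word2 ≠ comp_len then nxt1.set i.toNat (PySem.List.pyGetD nxt1 i 0 + 1) else nxt1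
  (prv2, nxt2)

def solution (words : List String) : Int :=
  let count := words.length
  if count == 1 then 1
  else
    let ws := PySem.List.sorted words (fun x => x) false
    let prv0 : List Int := PySem.List.pyRepeat [0] ((count : Int) - 1)
    let nxt0 : List Int := PySem.List.pyRepeat [0] ((count : Int) - 1)
    let st := (PySem.List.pyRange 0 ((ws.length : Int) - 1) 1).foldl (aStep ws) (prv0, nxt0)
    (((st.1 ++ [0]).zip ((0 : Int) :: st.2)).map (fun (p : Int × Int) => max p.1 p.2)).sum

-- ===== PORT B =====
-- cnt[p] = cnt.get(p, 0) + 1 over every prefix p = w[:k], k = 1 .. len(w), of every word;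
-- bGo is 'typed = len(w); for k in range(1, len(w)+1): if cnt[w[:k]] == 1: typed = k; break'
def bBuild (words : List String) : PySem.Dict String Int :=
  words.foldl (fun d w =>
    (PySem.List.pyRange 1 (PySem.Str.len w + 1) 1).foldl (fun d k =>
      let p := PySem.Str.slice w none (some k)
      d.insert p (d.getD p 0 + 1)) d) PySem.Dict.empty

def bGo (cnt : PySem.Dict String Int) (w : String) : List Int → Int
  | [] => PySem.Str.len w
  | k :: rest =>
    if cnt.getD (PySem.Str.slice w none (some k)) 0 == 1 then k
    else bGo cnt w rest

def solution_alt (words : List String) : Int :=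
  let cnt := bBuild words
  words.foldl (fun total w => total + bGo cnt w (PySem.List.pyRange 1 (PySem.Str.len w + 1) 1)) 0

-- ===== PRECONDITION & SPEC =====
-- On the one-element list [""] A's hardcoded single-word branch returns 1, but typing the
-- empty word needs 0 keystrokes, which is what B returns; B's value is the intended one.
def D_solution (words : List String) : Prop := words = [""]
instance (words : List String) : Decidable (D_solution words) := by unfold D_solution; infer_instance

def Spec_solution (words : List String) (out : Int) : Prop := ¬ D_solution words → out = solution_alt words
instance (words : List String) (out : Int) : Decidable (Spec_solution words out) := by unfold Spec_solution; infer_instance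

def pvDiffWitness_solution : List String := [""]
def pvDiffWitnessOut_solution : Int × Int := (1, 0)

-- ===== CLAIM (what is proved, stated in full; the proofs are below) =====
def Claim_unchanged_solution : Prop := ∀ (words : List String), Dom_solution words → Spec_solution words (solution words)
def Claim_changed_solution : Prop := Dom_solution (pvDiffWitness_solution) ∧ D_solution (pvDiffWitness_solution) ∧ solution (pvDiffWitness_solution) = pvDiffWitnessOut_solution.1 ∧ solution_alt (pvDiffWitness_solution) = pvDiffWitnessOut_solution.2 ∧ pvDiffWitnessOut_solution.1 ≠ pvDiffWitnessOut_solution.2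
def Claim_exact_solution : Prop := ∀ (words : List String), Dom_solution words → D_solution words → solution words ≠ solution_alt words

-- ===== LEMMAS AND PROOFS =====

-- longest-common-prefix length
def lcp : List Char → List Char → Nat
  | a :: as, b :: bs => if a = b then lcp as bs + 1 else 0
  | _, _ => 0

theorem lcp_comm (a b : List Char) : lcp a b = lcp b a := by
  induction a generalizing b with
  | nil => cases b <;> simp [lcp]
  | cons x as ih =>
    cases b with
    | nil => simp [lcp]
    | cons y bs =>
      by_cases h : x = y
      · subst h; simp [lcp, ih]
      · simp [lcp, h, Ne.symm h]

theorem lcp_le_left (a b : List Char) : lcp a b ≤ a.length := by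
  induction a generalizing b with
  | nil => cases b <;> simp [lcp]
  | cons x as ih =>
    cases b with
    | nil => simp [lcp]
    | cons y bs =>
      by_cases h : x = y <;> simp [lcp, h]
      exact ih bs

theorem lcp_le_right (a b : List Char) : lcp a b ≤ b.length := by
  rw [lcp_comm]; exact lcp_le_left b a

theorem lcp_self (a : List Char) : lcp a a = a.length := by
  induction a with
  | nil => simp [lcp]
  | cons x as ih => simp [lcp, ih]

theorem take_eq_iff_le_lcp (a b : List Char) (k : Nat) (hk : k ≤ min a.length b.length) :
    (a.take k = b.take k) ↔ k ≤ lcp a b := by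
  induction a generalizing b k with
  | nil =>
    simp at hk; subst hk; simp
  | cons x as ih =>
    cases b with
    | nil => simp at hk; subst hk; simp
    | cons y bs =>
      cases k with
      | zero => simp
      | succ k =>
        simp only [List.take_succ_cons]
        by_cases h : x = y
        · subst h
          rw [show lcp (x :: as) (x :: bs) = lcp as bs + 1 from by simp [lcp]]
          simp only [List.cons.injEq, true_and]
          rw [ih bs k (by simp at hk ⊢; omega)]
          omega
        · simp [lcp, h]

theorem prefix_iff_le_lcp (a b : List Char) (k : Nat) (hk : k ≤ a.length) :
    a.take k <+: b ↔ k ≤ lcp a b := by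
  rw [List.prefix_iff_eq_take, List.length_take, Nat.min_eq_left hk]
  by_cases hb : k ≤ b.length
  · rw [take_eq_iff_le_lcp a b k (by omega)]
  · constructor
    · intro h
      have := congrArg List.length h
      simp [List.length_take] at this
      omega
    · intro h
      have := lcp_le_right a b
      omega

theorem lcp_between (a b c : List Char) (hab : a ≤ b) (hbc : b ≤ c) :
    lcp a c ≤ lcp b c ∧ lcp a c ≤ lcp a b := by
  rcases lt_or_eq_of_le hab with hab' | rfl
  · rcases lt_or_eq_of_le hbc with hbc' | rfl
    · replace hab' : List.Lex (· < ·) a b := hab'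
      replace hbc' : List.Lex (· < ·) b c := hbc'
      clear hab hbc
      induction hab' generalizing c with
      | nil => simp [lcp]
      | @cons x as bs h ih =>
        cases hbc' with
        | cons h2 =>
          rename_i cs
          have := ih cs h2
          rw [show lcp (x :: as) (x :: cs) = lcp as cs + 1 from by simp [lcp],
              show lcp (x :: bs) (x :: cs) = lcp bs cs + 1 from by simp [lcp],
              show lcp (x :: as) (x :: bs) = lcp as bs + 1 from by simp [lcp]]
          omega
        | rel h2 =>
          rename_i z cs
          have hne : x ≠ z := ne_of_lt h2
          rw [show lcp (x :: as) (z :: cs) = 0 from by simp [lcp, hne]]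
          simp
      | @rel x as y bs hxy =>
        cases hbc' with
        | cons h2 =>
          rename_i cs
          have hne : x ≠ y := ne_of_lt hxy
          rw [show lcp (x :: as) (y :: cs) = 0 from by simp [lcp, hne]]
          simp
        | rel h2 =>
          rename_i z cs
          have hne : x ≠ z := ne_of_lt (lt_trans hxy h2)
          rw [show lcp (x :: as) (z :: cs) = 0 from by simp [lcp, hne]]
          simp
    · refine ⟨?_, le_refl _⟩
      rw [lcp_self]
      exact lcp_le_right a b
  · refine ⟨le_refl _, ?_⟩
    rw [lcp_self]
    exact lcp_le_left a c

theorem swGo_spec (w1 w2 : List Char) (m : Nat) (hm : m = min w1.length w2.length) :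
    ∀ j i : Nat, i ≤ m → m - i = j → w1.take i = w2.take i →
    swGo w1 w2 (↑m) ((List.range' i (m - i)).map (fun (k : Nat) => (k : Int))) = w1.take (lcp w1 w2) := by
  intro j
  induction j with
  | zero =>
    intro i hi hj htake
    have : i = m := by omega
    subst this
    rw [hj]
    simp only [List.range'_zero, List.map_nil, swGo]
    rw [PySem.List.slice_to w1 (Int.natCast_nonneg _)]
    simp only [Int.toNat_natCast]
    have hlcp : lcp w1 w2 = i := by
      have h1 : i ≤ lcp w1 w2 := (take_eq_iff_le_lcp w1 w2 i (by omega)).mp htake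
      have h2 : lcp w1 w2 ≤ w1.length := lcp_le_left w1 w2
      have h3 : lcp w1 w2 ≤ w2.length := lcp_le_right w1 w2
      omega
    rw [hlcp]
  | succ j ih =>
    intro i hi hj htake
    have hilt : i < m := by omega
    rw [hj, List.range'_succ, List.map_cons]
    simp only [swGo, PySem.List.pyGet?_natCast]
    by_cases heq : w1[i]? = w2[i]?
    · rw [if_neg (by simpa using heq)]
      have htake' : w1.take (i + 1) = w2.take (i + 1) := by
        rw [List.take_add_one, List.take_add_one, htake, heq]
      have := ih (i + 1) (by omega) (by omega) htake'
      rw [show m - (i+1) = j from by omega] at this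
      exact this
    · rw [if_pos (by simpa using heq)]
      rw [PySem.List.slice_to w1 (Int.natCast_nonneg _)]
      simp only [Int.toNat_natCast]
      have hlcp : lcp w1 w2 = i := by
        have h1 : i ≤ lcp w1 w2 := (take_eq_iff_le_lcp w1 w2 i (by omega)).mp htake
        by_contra hne
        have h2 : i + 1 ≤ lcp w1 w2 := by omega
        have htake2 : w1.take (i + 1) = w2.take (i + 1) :=
          (take_eq_iff_le_lcp w1 w2 (i + 1) (by omega)).mpr h2
        have := congrArg (fun l => l[i]?) htake2
        simp only [List.getElem?_take, if_pos (Nat.lt_succ_self i)] at this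
        exact heq (by simpa using this)
      rw [hlcp]

theorem startswith_text_len (u v : String) :
    PySem.Str.len (startswith_text u v) = (lcp u.toList v.toList : Nat) := by
  unfold startswith_text
  have hm : min (PySem.Str.len u) (PySem.Str.len v) = ((min u.toList.length v.toList.length : Nat) : Int) := by
    simp [PySem.Str.len_eq, Nat.cast_min]
  simp only [hm, PySem.List.pyRange_zero_natCast, List.range_eq_range']
  have := swGo_spec u.toList v.toList (min u.toList.length v.toList.length) rfl
    (min u.toList.length v.toList.length) 0 (by omega) (by omega) (by simp)
  rw [Nat.sub_zero] at this
  rw [this]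
  rw [PySem.Str.len_eq]
  have h1 : (String.ofList (List.take (lcp u.toList v.toList) u.toList)).toList
      = List.take (lcp u.toList v.toList) u.toList := by simp
  rw [h1, List.length_take, Nat.min_eq_left (lcp_le_left u.toList v.toList)]

def wAt (s : List String) (i : Nat) : List Char := (s.getD i "").toList
def lAt (s : List String) (i : Nat) : Nat := lcp (wAt s i) (wAt s (i + 1))
def pfA (s : List String) (i : Nat) : Int :=
  (lAt s i : Int) + (if ((wAt s i).length : Int) ≠ (lAt s i : Int) then 1 else 0)
def nfA (s : List String) (i : Nat) : Int :=
  (lAt s i : Int) + (if ((wAt s (i + 1)).length : Int) ≠ (lAt s i : Int) then 1 else 0)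

theorem aStep_set (s : List String) (m j : Nat) (hj : j < m) :
    aStep s ((List.range j).map (pfA s) ++ List.replicate (m - j) 0,
             (List.range j).map (nfA s) ++ List.replicate (m - j) 0) (j : Int) =
    ((List.range (j + 1)).map (pfA s) ++ List.replicate (m - (j + 1)) 0,
     (List.range (j + 1)).map (nfA s) ++ List.replicate (m - (j + 1)) 0) := by
  have hrep : List.replicate (m - j) (0 : Int) = 0 :: List.replicate (m - (j + 1)) 0 := by
    rw [show m - j = (m - (j + 1)) + 1 from by omega, List.replicate_succ]
  have hlen1 : ((List.range j).map (pfA s)).length = j := by simp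
  have hlen2 : ((List.range j).map (nfA s)).length = j := by simp
  unfold aStep
  simp only [PySem.List.pyGetD_natCast]
  have hw2 : PySem.List.pyGetD s ((j : Int) + 1) "" = s.getD (j + 1) "" := by
    rw [show ((j : Int) + 1) = ((j + 1 : Nat) : Int) from by push_cast; ring, PySem.List.pyGetD_natCast]
  rw [hw2]
  have hcomp : PySem.Str.len (startswith_text (s.getD j "") (s.getD (j + 1) "")) = (lAt s j : Int) :=
    startswith_text_len _ _
  rw [hcomp]
  have hlenw1 : PySem.Str.len (s.getD j "") = ((wAt s j).length : Int) := by
    rw [PySem.Str.len_eq]; rfl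
  have hlenw2 : PySem.Str.len (s.getD (j + 1) "") = ((wAt s (j + 1)).length : Int) := by
    rw [PySem.Str.len_eq]; rfl
  rw [hlenw1, hlenw2, hrep]
  have hset : ∀ f : List String → Nat → Int,
      (((List.range j).map (f s) ++ 0 :: List.replicate (m - (j + 1)) 0).set (j : Int).toNat (lAt s j : Int))
        = (List.range j).map (f s) ++ (lAt s j : Int) :: List.replicate (m - (j + 1)) 0 := by
    intro f
    rw [Int.toNat_natCast, List.set_append]
    simp
  rw [hset (fun s => pfA s), hset (fun s => nfA s)]
  have hget : ∀ t : List Int,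
      ((List.range j).map (pfA s) ++ (lAt s j : Int) :: t).getD j 0 = (lAt s j : Int) := by
    intro t
    rw [List.getD_eq_getElem?_getD, List.getElem?_append_right (by simp), hlen1]
    simp
  have hget2 : ∀ t : List Int,
      ((List.range j).map (nfA s) ++ (lAt s j : Int) :: t).getD j 0 = (lAt s j : Int) := by
    intro t
    rw [List.getD_eq_getElem?_getD, List.getElem?_append_right (by simp), hlen2]
    simp
  have hsetmid : ∀ (l1 : List Int) (t : List Int) (v : Int), l1.length = j →
      ((l1 ++ (lAt s j : Int) :: t).set (j : Int).toNat v) = l1 ++ v :: t := by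
    intro l1 t v hl
    rw [Int.toNat_natCast, List.set_append]
    simp [hl]
  rw [Prod.mk.injEq]
  constructor
  case _ =>
    -- first component
    by_cases hc : ((wAt s j).length : Int) ≠ (lAt s j : Int)
    · rw [if_pos hc, hget, hsetmid _ _ _ hlen1]
      rw [List.range_succ, List.map_append]
      simp [pfA]
      exact_mod_cast hc
    · rw [if_neg hc]
      rw [List.range_succ, List.map_append]
      simp only [List.map_cons, List.map_nil, List.append_assoc, List.singleton_append]
      congr 1
      simp only [pfA]
      rw [if_neg hc]
      simp
  case _ =>
    by_cases hc : ((wAt s (j + 1)).length : Int) ≠ (lAt s j : Int)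
    · rw [if_pos hc, hget2, hsetmid _ _ _ hlen2]
      rw [List.range_succ, List.map_append]
      simp [nfA]
      exact_mod_cast hc
    · rw [if_neg hc]
      rw [List.range_succ, List.map_append]
      simp only [List.map_cons, List.map_nil, List.append_assoc, List.singleton_append]
      congr 1
      simp only [nfA]
      rw [if_neg hc]
      simp

theorem aLoop_inv (s : List String) (m : Nat) :
    ∀ j : Nat, j ≤ m →
    ((List.range j).map (fun (k : Nat) => (k : Int))).foldl (aStep s)
        (List.replicate m 0, List.replicate m 0) =
      ((List.range j).map (pfA s) ++ List.replicate (m - j) 0,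
       (List.range j).map (nfA s) ++ List.replicate (m - j) 0) := by
  intro j
  induction j with
  | zero => simp
  | succ j ih =>
    intro hj
    conv_lhs => rw [List.range_succ]
    rw [List.map_append, List.foldl_append, ih (by omega)]
    simp only [List.map_cons, List.map_nil, List.foldl_cons, List.foldl_nil]
    exact aStep_set s m j (by omega)

theorem aLoop_closed (s : List String) (n : Nat) (hn : n = s.length) :
    (PySem.List.pyRange 0 ((n : Int) - 1) 1).foldl (aStep s)
        (PySem.List.pyRepeat [0] ((n : Int) - 1), PySem.List.pyRepeat [0] ((n : Int) - 1)) =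
      ((List.range (n - 1)).map (pfA s), (List.range (n - 1)).map (nfA s)) := by
  rw [PySem.List.pyRepeat_singleton]
  rcases Nat.eq_zero_or_pos n with h0 | hpos
  · subst h0
    simp only [Nat.cast_zero, zero_sub]
    rw [show PySem.List.pyRange 0 (-1) 1 = [] from rfl]
    simp
  · have hcast : ((n : Int) - 1) = ((n - 1 : Nat) : Int) := by omega
    rw [hcast, PySem.List.pyRange_zero_natCast, Int.toNat_natCast]
    have := aLoop_inv s (n - 1) (n - 1) (le_refl _)
    simpa using this

def nbAt (s : List String) (i : Nat) : Nat :=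
  max (if i = 0 then 0 else lAt s (i - 1)) (if i + 1 < s.length then lAt s i else 0)
def costI (s : List String) (i : Nat) : Int :=
  min ((wAt s i).length : Int) ((nbAt s i : Int) + 1)

theorem termA (s : List String) (j : Nat) (h2 : 2 ≤ s.length) (hj : j < s.length) :
    max (if j < s.length - 1 then pfA s j else 0) (if j = 0 then 0 else nfA s (j - 1)) = costI s j := by
  have f1 : lAt s j ≤ (wAt s j).length := lcp_le_left _ _
  have f2 : lAt s j ≤ (wAt s (j + 1)).length := lcp_le_right _ _
  by_cases hz : j = 0
  · subst hz
    have h01 : (0 : Nat) < s.length - 1 := by omega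
    have h01' : (0 : Nat) + 1 < s.length := by omega
    simp only [costI, nbAt, pfA, if_pos h01, if_pos h01']
    split_ifs with hc <;> omega
  · have f3 : lAt s (j - 1) ≤ (wAt s j).length := by
      unfold lAt
      rw [show j - 1 + 1 = j from by omega]
      exact lcp_le_right _ _
    simp only [costI, nbAt, pfA, nfA, if_neg hz]
    rw [show j - 1 + 1 = j from by omega]
    by_cases hl : j < s.length - 1
    · have hl' : j + 1 < s.length := by omega
      rw [if_pos hl, if_pos hl']
      split_ifs with hc1 hc2 <;> omega
    · have hl' : ¬ (j + 1 < s.length) := by omega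
      rw [if_neg hl, if_neg hl']
      split_ifs with hc1 <;> omega

theorem zipSum_eq (s : List String) (m : Nat) (hm : m + 1 = s.length) (h1 : 1 ≤ m) :
    ((((List.range m).map (pfA s) ++ [0]).zip ((0 : Int) :: (List.range m).map (nfA s))).map
        (fun (p : Int × Int) => max p.1 p.2)).sum =
      ((List.range (m + 1)).map (costI s)).sum := by
  have hz : ((List.range m).map (pfA s) ++ [0]).zip ((0 : Int) :: (List.range m).map (nfA s)) =
      (List.range (m + 1)).map (fun j => ((if j < m then pfA s j else 0), (if j = 0 then (0 : Int) else nfA s (j - 1)))) := by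
    apply List.ext_getElem
    · simp
    · intro i hi1 hi2
      have him : i < m + 1 := by simpa using hi2
      rw [List.getElem_zip, List.getElem_map, List.getElem_range]
      by_cases hilt : i < m
      · rw [List.getElem_append_left (by simpa using hilt)]
        rw [List.getElem_map, List.getElem_range]
        cases i with
        | zero => simp [hilt]
        | succ k =>
          simp only [List.getElem_cons_succ, List.getElem_map, List.getElem_range, if_pos hilt]
          simp
      · obtain ⟨k, rfl⟩ : ∃ k, m = k + 1 := ⟨m - 1, by omega⟩
        have hieq : i = k + 1 := by omega
        subst hieq
        rw [List.getElem_append_right (by simpa using hilt)]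
        simp only [if_neg hilt, List.getElem_cons_succ, List.getElem_map, List.getElem_range]
        simp [show ¬ (k + 1 = 0) from by omega]
  rw [hz, List.map_map]
  apply congrArg
  apply List.map_congr_left
  intro j hjmem
  have hj : j < m + 1 := List.mem_range.mp hjmem
  have := termA s j (by omega) (by omega)
  rw [show s.length - 1 = m from by omega] at this
  simpa [Function.comp] using this

theorem solution_eq_sum (words : List String) (h2 : 2 ≤ words.length) :
    solution words = ((List.range (PySem.List.sorted words (fun x => x) false).length).map
      (costI (PySem.List.sorted words (fun x => x) false))).sum := by
  unfold solution
  have hne : ¬ (words.length == 1) = true := by simp; omega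
  rw [if_neg hne]
  dsimp only
  set s := PySem.List.sorted words (fun x => x) false with hs
  have hlen : s.length = words.length := PySem.List.length_sorted words _ false
  rw [show ((words.length : Int) - 1) = (((s.length : Nat) : Int) - 1) from by rw [hlen]]
  rw [aLoop_closed s s.length rfl]
  have := zipSum_eq s (s.length - 1) (by omega) (by omega)
  rw [show s.length - 1 + 1 = s.length from by omega] at this
  exact this

def countPref (ws : List String) (p : List Char) : Nat :=
  ws.countP (fun w => decide (p <+: w.toList))

theorem pyRangeOne (L : Nat) :
    PySem.List.pyRange 1 ((L : Int) + 1) 1 = (List.range' 1 L).map (fun k : Nat => (k : Int)) := by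
  induction L with
  | zero => simp [PySem.List.pyRange]
  | succ n ih =>
    rw [show ((n + 1 : Nat) : Int) + 1 = (((n : Nat) : Int) + 1) + 1 from by push_cast; ring]
    rw [PySem.List.pyRange_one_succ_right (by omega), ih, List.range'_1_concat, List.map_append]
    push_cast
    simp
    omega

def prefS (w : String) : List String :=
  (List.range' 1 w.toList.length).map (fun (k : Nat) => PySem.Str.slice w none (some (k : Int)))

theorem slice_toList (w : String) (k : Nat) :
    (PySem.Str.slice w none (some (k : Int))).toList = w.toList.take k := by
  rw [PySem.Str.toList_slice, PySem.Chars.slice_eq_listSlice,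
      PySem.List.slice_to _ (Int.natCast_nonneg _), Int.toNat_natCast]

theorem count_prefS (w p : String) (hp : p.toList ≠ []) :
    (prefS w).count p = (if p.toList <+: w.toList then 1 else 0) := by
  unfold prefS
  rw [List.count_eq_countP, List.countP_map]
  by_cases hpre : p.toList <+: w.toList
  · rw [if_pos hpre]
    have hkey : ∀ k ∈ List.range' 1 w.toList.length,
        ((fun x => x == p) ∘ fun k : Nat => PySem.Str.slice w none (some (k : Int))) k =
          decide (k = p.toList.length) := by
      intro k hk
      have hk' : 1 ≤ k ∧ k < 1 + w.toList.length := by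
        have := List.mem_range'_1.mp hk; omega
      simp only [Function.comp_apply, beq_iff_eq]
      by_cases he : k = p.toList.length
      · have : (PySem.Str.slice w none (some (k : Int))) = p := by
          apply String.toList_inj.mp
          rw [slice_toList, he]
          exact (List.prefix_iff_eq_take.mp hpre).symm
        simp only [this]
        simp [he]
      · have hns : ¬ (PySem.Str.slice w none (some (k : Int)) = p) := by
          intro hcontra
          apply he
          have h2 := congrArg (fun s : String => s.toList.length) hcontra
          simp only [slice_toList, List.length_take] at h2
          omega
        have he' : ¬ k = p.length := by simpa using he
        simp [he, he', hns]
    rw [List.countP_congr (fun k hk => by rw [hkey k hk])]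
    have : List.countP (fun k => decide (k = p.toList.length)) (List.range' 1 w.toList.length) =
        List.count p.toList.length (List.range' 1 w.toList.length) := by
      rw [List.count_eq_countP]
      apply List.countP_congr
      intro k _
      constructor <;> intro h <;> simp_all
    rw [this]
    apply List.count_eq_one_of_mem (List.nodup_range')
    rw [List.mem_range'_1]
    have h1 : 1 ≤ p.toList.length := by
      cases hl : p.toList with
      | nil => exact absurd hl hp
      | cons c cs => simp [hl]
    have h2 : p.toList.length ≤ w.toList.length := hpre.length_le
    omega
  · rw [if_neg hpre]
    apply List.countP_eq_zero.mpr
    intro k hk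
    simp only [Function.comp_apply, beq_iff_eq]
    intro hcontra
    apply hpre
    rw [← hcontra, slice_toList]
    exact List.take_prefix k w.toList

theorem bBuild_inner (w : String) (d : PySem.Dict String Int) :
    (PySem.List.pyRange 1 (PySem.Str.len w + 1) 1).foldl (fun d k =>
      let p := PySem.Str.slice w none (some k)
      d.insert p (d.getD p 0 + 1)) d
    = (prefS w).foldl (fun d x => d.insert x (d.getD x 0 + 1)) d := by
  rw [PySem.Str.len_eq, pyRangeOne, List.foldl_map]
  unfold prefS
  rw [List.foldl_map]

theorem bBuild_getD (words : List String) (p : String) (hp : p.toList ≠ []) :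
    (bBuild words).getD p 0 = (countPref words p.toList : Int) := by
  suffices H : ∀ d : PySem.Dict String Int,
      (words.foldl (fun d w =>
        (PySem.List.pyRange 1 (PySem.Str.len w + 1) 1).foldl (fun d k =>
          let p := PySem.Str.slice w none (some k)
          d.insert p (d.getD p 0 + 1)) d) d).getD p 0 = d.getD p 0 + (countPref words p.toList : Int) by
    have := H PySem.Dict.empty
    unfold bBuild
    rw [this, PySem.Dict.getD_empty]
    ring
  induction words with
  | nil => intro d; simp [countPref]
  | cons w ws ih =>
    intro d
    rw [List.foldl_cons, ih, bBuild_inner, PySem.Dict.getD_foldl_insert_add_one, count_prefS w p hp]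
    unfold countPref
    rw [List.countP_cons]
    by_cases hc : p.toList <+: w.toList
    · simp only [hc, if_pos, decide_true]
      push_cast
      ring
    · simp only [hc, decide_false]
      push_cast
      ring

theorem key_iff (s : List String) (hs : s.Pairwise (· ≤ ·)) (i : Nat) (hi : i < s.length)
    (k : Nat) (hk1 : 1 ≤ k) (hk : k ≤ (wAt s i).length) :
    countPref s ((wAt s i).take k) = 1 ↔ nbAt s i < k := by
  have hmono : ∀ a b : Nat, a ≤ b → b < s.length → wAt s a ≤ wAt s b := by
    intro a b hab hb
    rcases Nat.eq_or_lt_of_le hab with rfl | hlt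
    · exact le_refl _
    · have := (List.pairwise_iff_getElem.mp hs) a b (by omega) hb hlt
      have h1 : wAt s a = (s[a]).toList := by unfold wAt; rw [List.getD_eq_getElem s "" (by omega)]
      have h2 : wAt s b = (s[b]).toList := by unfold wAt; rw [List.getD_eq_getElem s "" hb]
      rw [h1, h2]
      exact String.le_iff_toList_le.mp this
  have hwat : ∀ (j : Nat) (hj : j < s.length), wAt s j = (s[j]'hj).toList := by
    intro j hj; unfold wAt; rw [List.getD_eq_getElem s "" hj]
  -- step 1: countPref = 1 ↔ no other index shares the k-prefix
  have hq : ∀ (j : Nat) (hj : j < s.length),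
      ((fun w => decide ((wAt s i).take k <+: w.toList)) (s[j]'hj) = true ↔ k ≤ lcp (wAt s i) (wAt s j)) := by
    intro j hj
    rw [decide_eq_true_iff, ← hwat j hj]
    exact prefix_iff_le_lcp (wAt s i) (wAt s j) k hk
  have hperm : s.Perm (s[i] :: s.eraseIdx i) := (List.getElem_cons_eraseIdx_perm hi).symm
  have hcount : countPref s ((wAt s i).take k)
      = 1 + (s.eraseIdx i).countP (fun w => decide ((wAt s i).take k <+: w.toList)) := by
    unfold countPref
    rw [hperm.countP_eq, List.countP_cons]
    have : (fun w => decide ((wAt s i).take k <+: w.toList)) (s[i]) = true := by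
      rw [hq i hi]
      have h1 : lcp (wAt s i) (wAt s i) = (wAt s i).length := lcp_self _
      omega
    rw [if_pos this]
    omega
  rw [hcount]
  have hiff1 : (1 + (s.eraseIdx i).countP (fun w => decide ((wAt s i).take k <+: w.toList)) = 1)
      ↔ (∀ j : Nat, j < s.length → j ≠ i → lcp (wAt s i) (wAt s j) < k) := by
    constructor
    · intro h j hj hne
      have hz : (s.eraseIdx i).countP (fun w => decide ((wAt s i).take k <+: w.toList)) = 0 := by omega
      have := List.countP_eq_zero.mp hz (s[j]'hj) (by
        rw [List.mem_eraseIdx_iff_getElem]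
        exact ⟨j, hj, hne, rfl⟩)
      have h2 := hq j hj
      by_contra hc
      exact this (h2.mpr (by omega))
    · intro h
      have hz : (s.eraseIdx i).countP (fun w => decide ((wAt s i).take k <+: w.toList)) = 0 := by
        apply List.countP_eq_zero.mpr
        intro x hx
        rw [List.mem_eraseIdx_iff_getElem] at hx
        obtain ⟨j, hj, hne, rfl⟩ := hx
        intro hcontra
        have := (hq j hj).mp hcontra
        have := h j hj hne
        omega
      omega
  rw [hiff1]
  -- step 2: the quantified bound equals the neighbour bound
  unfold nbAt
  constructor
  · intro h
    have hL : (if i = 0 then 0 else lAt s (i - 1)) < k := by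
      by_cases hz : i = 0
      · simpa [hz] using hk1
      · rw [if_neg hz]
        have hj : i - 1 < s.length := by omega
        have := h (i - 1) hj (by omega)
        unfold lAt
        rw [show i - 1 + 1 = i from by omega, lcp_comm]
        exact this
    have hR : (if i + 1 < s.length then lAt s i else 0) < k := by
      by_cases hz : i + 1 < s.length
      · rw [if_pos hz]
        have := h (i + 1) hz (by omega)
        unfold lAt
        exact this
      · simpa [hz] using hk1
    omega
  · intro h j hj hne
    rcases Nat.lt_or_ge j i with hji | hji
    · -- j < i, so i ≥ 1
      have hnz : ¬ (i = 0) := by omega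
      have hch := lcp_between (wAt s j) (wAt s (i - 1)) (wAt s i)
        (hmono j (i - 1) (by omega) (by omega)) (hmono (i - 1) i (by omega) hi)
      have heq : lcp (wAt s (i - 1)) (wAt s i) = lAt s (i - 1) := by
        unfold lAt
        rw [show i - 1 + 1 = i from by omega]
      rw [lcp_comm]
      have hle : (if i = 0 then 0 else lAt s (i - 1)) < k := by omega
      rw [if_neg hnz] at hle
      omega
    · have hji' : i < j := by omega
      have hch := lcp_between (wAt s i) (wAt s (i + 1)) (wAt s j)
        (hmono i (i + 1) (by omega) (by omega)) (hmono (i + 1) j (by omega) hj)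
      have heq : lcp (wAt s i) (wAt s (i + 1)) = lAt s i := rfl
      have h1p : i + 1 < s.length := by omega
      have hle : (if i + 1 < s.length then lAt s i else 0) < k := by omega
      rw [if_pos h1p] at hle
      omega

theorem bGo_spec (cnt : PySem.Dict String Int) (w : String) (nb : Nat)
    (hchar : ∀ k : Nat, 1 ≤ k → k ≤ w.toList.length →
      (cnt.getD (PySem.Str.slice w none (some (k : Int))) 0 = 1 ↔ nb < k)) :
    ∀ j k : Nat, 1 ≤ k → k ≤ min w.toList.length (nb + 1) + 1 → w.toList.length + 1 - k = j →
    (∀ m, 1 ≤ m → m < k → ¬ nb < m) →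
    bGo cnt w ((List.range' k j).map (fun (t : Nat) => (t : Int))) =
      min (w.toList.length : Int) ((nb : Int) + 1) := by
  intro j
  induction j with
  | zero =>
    intro k hk1 hkmin hkj _
    have hkL : k = w.toList.length + 1 := by omega
    simp only [List.range'_zero, List.map_nil, bGo, PySem.Str.len_eq]
    omega
  | succ j ih =>
    intro k hk1 hkmin hkj hprev
    have hkL : k ≤ w.toList.length := by omega
    rw [List.range'_succ, List.map_cons]
    simp only [bGo]
    have htest := hchar k hk1 hkL
    by_cases hnb : nb < k
    · rw [if_pos (by rw [beq_iff_eq]; exact htest.mpr hnb)]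
      have : k = min (w.toList.length) (nb + 1) := by
        rcases Nat.eq_or_lt_of_le hk1 with h1 | h2
        · omega
        · have := hprev (k - 1) (by omega) (by omega)
          omega
      omega
    · rw [if_neg (by rw [beq_iff_eq]; intro hcontra; exact hnb (htest.mp hcontra))]
      apply ih (k + 1) (by omega) (by omega) (by omega)
      intro m hm1 hm2
      rcases Nat.lt_or_ge m k with hmk | hmk
      · exact hprev m hm1 hmk
      · have : m = k := by omega
        subst this
        exact hnb

theorem bGo_costI (words : List String) (s : List String)
    (hs : s = PySem.List.sorted words (fun x => x) false) (i : Nat) (hi : i < s.length) :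
    bGo (bBuild words) (s.getD i "")
        (PySem.List.pyRange 1 (PySem.Str.len (s.getD i "") + 1) 1) = costI s i := by
  have hwl : (s.getD i "").toList = wAt s i := rfl
  have hperm : s.Perm words := by rw [hs]; exact PySem.List.sorted_perm words _ false
  have hpair : s.Pairwise (· ≤ ·) := by rw [hs]; exact PySem.List.sorted_pairwise words _
  have hchar : ∀ k : Nat, 1 ≤ k → k ≤ (s.getD i "").toList.length →
      ((bBuild words).getD (PySem.Str.slice (s.getD i "") none (some (k : Int))) 0 = 1 ↔ nbAt s i < k) := by
    intro k hk1 hkL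
    have hptl : (PySem.Str.slice (s.getD i "") none (some (k : Int))).toList = (wAt s i).take k := by
      rw [slice_toList, hwl]
    have hne : (PySem.Str.slice (s.getD i "") none (some (k : Int))).toList ≠ [] := by
      rw [hptl]
      intro hcontra
      have := congrArg List.length hcontra
      simp only [List.length_take, List.length_nil] at this
      rw [hwl] at hkL
      omega
    rw [bBuild_getD words _ hne, hptl]
    have hcnt : countPref words ((wAt s i).take k) = countPref s ((wAt s i).take k) := by
      unfold countPref
      exact (hperm.countP_eq _).symm
    rw [hcnt]
    rw [show ((countPref s ((wAt s i).take k) : Int) = 1) ↔ (countPref s ((wAt s i).take k) = 1) from by omega]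
    exact key_iff s hpair i hi k hk1 (by rw [hwl] at hkL; omega)
  rw [PySem.Str.len_eq, hwl, show ((wAt s i).length : Int) + 1 = (((wAt s i).length + 1 : Nat) : Int) from by push_cast; ring]
  have hrange : PySem.List.pyRange 1 (((wAt s i).length + 1 : Nat) : Int) 1 =
      (List.range' 1 ((wAt s i).length + 1 - 1)).map (fun (t : Nat) => (t : Int)) := by
    rw [show (((wAt s i).length + 1 : Nat) : Int) = ((wAt s i).length : Int) + 1 from by push_cast; ring]
    rw [pyRangeOne]
    simp
  rw [hrange]
  have := bGo_spec (bBuild words) (s.getD i "") (nbAt s i) (by rw [hwl] at hchar ⊢; exact hchar)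
    ((wAt s i).length + 1 - 1) 1 (by omega) (by rw [hwl]; omega) (by rw [hwl]) (by omega)
  rw [hwl] at this
  rw [this]
  unfold costI
  push_cast
  rfl

theorem solution_alt_eq_sum (words : List String) :
    solution_alt words = ((List.range (PySem.List.sorted words (fun x => x) false).length).map
      (costI (PySem.List.sorted words (fun x => x) false))).sum := by
  unfold solution_alt
  dsimp only
  rw [PySem.List.foldl_add]
  set s := PySem.List.sorted words (fun x => x) false with hs
  have hperm : s.Perm words := PySem.List.sorted_perm words _ false
  set g := fun w => bGo (bBuild words) w (PySem.List.pyRange 1 (PySem.Str.len w + 1) 1) with hg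
  have h1 : (words.map g).sum = (s.map g).sum := ((hperm.map g).sum_eq).symm
  rw [h1]
  have h2 : s.map g = (List.range s.length).map (costI s) := by
    apply List.ext_getElem
    · simp
    · intro i hi1 hi2
      simp only [List.getElem_map, List.getElem_range]
      have := bGo_costI words s hs i (by simpa using hi1)
      rw [List.getD_eq_getElem s "" (by simpa using hi1)] at this
      exact this
  rw [h2]
  ring

theorem costI_singleton (w : String) (hwl : w.toList ≠ []) : costI [w] 0 = 1 := by
  unfold costI nbAt wAt lAt
  have hlen1 : 1 ≤ w.toList.length := by
    cases h : w.toList with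
    | nil => exact absurd h hwl
    | cons c cs => simp
  simp only [List.length_singleton]
  norm_num
  rwa [String.length_toList] at hlen1

theorem main_eq (words : List String) (hD : ¬ words = [""]) : solution words = solution_alt words := by
  match words with
  | [] => decide
  | [w] =>
    have hw : w ≠ "" := fun h => hD (by rw [h])
    have hwl : w.toList ≠ [] := fun h => hw (by
      have := congrArg String.ofList h
      simpa using this)
    have hA : solution [w] = 1 := by unfold solution; rfl
    rw [hA, solution_alt_eq_sum]
    have hsorted : PySem.List.sorted [w] (fun x => x) false = [w] :=
      PySem.List.sorted_eq_self_of_pairwise _ _ (List.pairwise_singleton _ _)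
    rw [hsorted]
    simp [costI_singleton w hwl]
  | a :: b :: rest =>
    rw [solution_eq_sum _ (by simp), solution_alt_eq_sum]

-- ===== VERDICT (by name: the statement is the Claim_ definition above) =====
theorem solution_spec : Claim_unchanged_solution := by
  intro words _ hD
  exact main_eq words hD

theorem solution_changed : Claim_changed_solution := by
  unfold Claim_changed_solution; decide

theorem solution_tight : Claim_exact_solution := by
  intro words _ hD
  unfold D_solution at hD
  subst hD
  decide
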